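-- pv_equiv track=rewrite | github.com/GSG-Robots/spike-prime-code | src/games/hypernumbers.py | b2l
-- ===== SOURCE A (Python) =====
-- def b2l(number: int):
--     if not isinstance(number, int):
--         raise TypeError("Number must be int")
--     if not 0 <= number <= 33554431:
--         raise ValueError("Number must be between 0 and 33554431")
--     number <<= 1
--     counter = -1
--     result = [
--         [False, False, False, False, False],
--         [False, False, False, False, False],
--         [False, False, False, False, False],
--         [False, False, False, False, False],
--         [False, False, False, False, False],
--     ]
--
--     while number != 0 and counter < 25 - 1:
--         result[4 - (counter := counter + 1) // 5][4 - counter % 5] = bool((number := (number >> 1)) % 2)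
--     return result
-- ===== SOURCE B (Python) =====
-- def b2l(number: int):
--     if not isinstance(number, int):
--         raise TypeError("Number must be int")
--     if not 0 <= number <= 33554431:
--         raise ValueError("Number must be between 0 and 33554431")
--     return [[number >> (24 - 5 * r - c) & 1 == 1 for c in range(5)] for r in range(5)]
-- ===== Notes on version B (the rewrite author's own statement) =====
-- stated objective: simpler
-- what changed: Replaced A's sequential early-exit shift-and-accumulate loop (a walrus-updated counter selecting cells of a preallocated grid, mutating it bit by bit) by a stateless nested comprehension that computes each cell independently in closed form as the corresponding high-to-low bit of the number via a shift-and-mask test, with no mutation, no sequential state and no early exit.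
import Mathlib
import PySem

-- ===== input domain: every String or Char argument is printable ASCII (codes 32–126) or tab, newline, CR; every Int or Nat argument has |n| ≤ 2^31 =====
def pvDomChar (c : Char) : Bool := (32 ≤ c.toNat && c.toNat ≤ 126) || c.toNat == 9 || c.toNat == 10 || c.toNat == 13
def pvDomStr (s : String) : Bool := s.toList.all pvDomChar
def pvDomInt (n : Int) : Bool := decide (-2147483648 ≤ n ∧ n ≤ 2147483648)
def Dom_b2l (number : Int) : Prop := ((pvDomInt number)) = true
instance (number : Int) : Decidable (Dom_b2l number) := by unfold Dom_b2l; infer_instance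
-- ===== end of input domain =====

-- B replaces A's sequential early-exit shift-and-accumulate loop by a stateless nested
-- comprehension computing each cell independently as bit 24-5r-c of the number. Objective: simpler.

-- ===== PORT A =====
-- Python `result[i][j] = v`; in this program i and j are always in 0..4, where this
-- pure two-level update is exact.
def pySet2 (res : List (List Bool)) (i j : Int) (v : Bool) : List (List Bool) :=
  res.set i.toNat ((res.getD i.toNat []).set j.toNat v)

-- the while loop; counter strictly increases -1 → 24 so it runs at most 25
-- iterations: fuel 26 makes the recursion total without changing the computation.
def b2lLoop : Nat → Int → Int → List (List Bool) → List (List Bool)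
  | 0, _, _, res => res
  | fuel+1, n, counter, res =>
    if n ≠ 0 ∧ counter < 25 - 1 then
      -- result[4 - (counter := counter+1)//5][4 - counter%5] = bool((number := number>>1) % 2)
      b2lLoop fuel (PySem.Int.floordiv n 2) (counter + 1)
        (pySet2 res (4 - PySem.Int.floordiv (counter + 1) 5) (4 - PySem.Int.mod (counter + 1) 5)
          (decide (PySem.Int.mod (PySem.Int.floordiv n 2) 2 ≠ 0)))
    else res

def b2l (number : Int) : List (List Bool) :=
  if ¬ (0 ≤ number ∧ number ≤ 33554431) then []  -- raise ValueError (excluded by Pre_)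
  else
    b2lLoop 26 (number * 2) (-1)                 -- number <<= 1 ; counter = -1
      [[false, false, false, false, false],
       [false, false, false, false, false],
       [false, false, false, false, false],
       [false, false, false, false, false],
       [false, false, false, false, false]]

-- ===== PORT B =====
-- [[number >> (24 - 5*r - c) & 1 == 1 for c in range(5)] for r in range(5)]
-- `n >> k` = floor division by 2^k (exact for k ≥ 0; here k ∈ 0..24, so .toNat is exact),
-- `& 1` = Python `% 2` on any int.
def b2l_alt (number : Int) : List (List Bool) :=
  if ¬ (0 ≤ number ∧ number ≤ 33554431) then []  -- raise ValueError (excluded by Pre_)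
  else
    (PySem.List.pyRange 0 5 1).map (fun r =>
      (PySem.List.pyRange 0 5 1).map (fun c =>
        PySem.Int.mod (PySem.Int.floordiv number ((2:Int) ^ (24 - 5*r - c).toNat)) 2 == 1))

-- ===== PRECONDITION & SPEC =====
-- A raises ValueError outside 0..33554431 (and TypeError only for non-int arguments,
-- which the Int signature already excludes); Pre_ admits exactly the returning inputs.
def Pre_b2l (number : Int) : Prop := 0 ≤ number ∧ number ≤ 33554431
instance (number : Int) : Decidable (Pre_b2l number) := by unfold Pre_b2l; infer_instance
def pvWitness_b2l : Int := 1234567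
def Spec_b2l (number : Int) (out : List (List Bool)) : Prop := out = b2l_alt number
instance (number : Int) (out : List (List Bool)) : Decidable (Spec_b2l number out) := by
  unfold Spec_b2l; infer_instance

-- ===== CLAIM =====
def Claim_equal_b2l : Prop :=
  ∀ (number : Int), Dom_b2l number → Pre_b2l number → Spec_b2l number (b2l number)

-- ===== LEMMAS AND PROOFS =====

-- bit i of m, as both programs produce it
def pbit (m : Int) (i : Nat) : Bool := decide (m / 2^i % 2 = 1)

-- cell contents once the first k bits (bit indices 0..k-1) have been written
def cb (m : Int) (k i : Nat) : Bool := if i < k then pbit m i else false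

-- the grid after k iterations of A's loop: cell (r,c) holds bit 24-5r-c of m
def resAt (m : Int) (k : Nat) : List (List Bool) :=
  [[cb m k 24, cb m k 23, cb m k 22, cb m k 21, cb m k 20],
   [cb m k 19, cb m k 18, cb m k 17, cb m k 16, cb m k 15],
   [cb m k 14, cb m k 13, cb m k 12, cb m k 11, cb m k 10],
   [cb m k 9,  cb m k 8,  cb m k 7,  cb m k 6,  cb m k 5],
   [cb m k 4,  cb m k 3,  cb m k 2,  cb m k 1,  cb m k 0]]

theorem fd2 (a b : Int) (hb : 0 < b) : PySem.Int.floordiv a b = a / b :=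
  PySem.Int.floordiv_eq_ediv_of_pos hb
theorem md2 (a : Int) : PySem.Int.mod a 2 = a % 2 :=
  PySem.Int.mod_eq_emod_of_pos (by norm_num)

theorem pbit_zero (m : Int) (i : Nat) (h0 : 0 ≤ m) (h : m < 2^i) : pbit m i = false := by
  unfold pbit; rw [Int.ediv_eq_zero_of_lt h0 h]; decide

-- once the remaining number is 0 (2m < 2^k), the unwritten cells are correct already
theorem cb_eq_25 (m : Int) (k : Nat) (h0 : 0 ≤ m) (hk : k ≤ 24) (h2 : 2*m < 2^k) :
    ∀ i, cb m k i = cb m 25 i := by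
  intro i
  unfold cb
  by_cases hik : i < k
  · rw [if_pos hik, if_pos (by omega)]
  · rw [if_neg hik]
    by_cases hi25 : i < 25
    · rw [if_pos hi25]
      refine (pbit_zero m i h0 ?_).symm
      have : (2:Int)^k ≤ 2^i := pow_le_pow_right₀ (by norm_num) (by omega)
      omega
    · rw [if_neg hi25]

-- writing bit k at indices (4 - k//5, 4 - k%5) advances the grid from k to k+1
theorem set_step (m : Int) (k : Nat) (hk : k ≤ 24) :
    pySet2 (resAt m k) (4 - PySem.Int.floordiv (k : Int) 5) (4 - PySem.Int.mod (k : Int) 5)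
      (pbit m k) = resAt m (k+1) := by
  rw [PySem.Int.floordiv_eq_ediv_of_pos (by norm_num), PySem.Int.mod_eq_emod_of_pos (by norm_num)]
  interval_cases k <;> simp [pySet2, resAt, cb]

-- invariant of A's loop: at step k the state is (2m)/2^k, counter k-1, grid resAt m k
theorem loopA (j : Nat) : ∀ (k : Nat) (m : Int), 0 ≤ m → k + j = 25 →
    b2lLoop (j+1) (2*m / 2^k) ((k : Int) - 1) (resAt m k) = resAt m 25 := by
  induction j with
  | zero =>
    intro k m h0 hjk
    rw [b2lLoop, if_neg (by omega)]
    have : k = 25 := by omega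
    subst this; rfl
  | succ j ih =>
    intro k m h0 hjk
    rw [b2lLoop]
    by_cases hc : 2*m / 2^k ≠ 0 ∧ (k : Int) - 1 < 25 - 1
    · rw [if_pos hc]
      have hk24 : k ≤ 24 := by omega
      have hv : decide (PySem.Int.mod (PySem.Int.floordiv (2*m / 2^k) 2) 2 ≠ 0) = pbit m k := by
        rw [fd2 _ _ (by norm_num), md2]
        have hd : 2*m / 2^k / 2 = m / 2^k := by
          rw [Int.ediv_ediv_of_nonneg (by positivity),
              show (2:Int)^k * 2 = 2 * 2^k by ring,
              Int.mul_ediv_mul_of_pos _ _ (by norm_num)]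
        rw [hd]
        unfold pbit
        have hnn : 0 ≤ m / 2^k := Int.ediv_nonneg h0 (by positivity)
        apply decide_eq_decide.mpr
        omega
      have hn' : PySem.Int.floordiv (2*m / 2^k) 2 = 2*m / 2^(k+1) := by
        rw [fd2 _ _ (by norm_num), Int.ediv_ediv_of_nonneg (by positivity), pow_succ]
      rw [hv, hn', show (k:Int) - 1 + 1 = ((k:Nat):Int) by ring, set_step m k hk24]
      rw [show ((k:Nat):Int) = ((k+1:Nat):Int) - 1 by push_cast; ring]
      exact ih (k+1) m h0 (by omega)
    · rw [if_neg hc]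
      have hk24 : k ≤ 24 := by omega
      have hz : 2*m / 2^k = 0 := by
        by_cases h : 2*m / 2^k = 0
        · exact h
        · exact absurd (by omega : (k:Int) - 1 < 25 - 1) (fun hh => hc ⟨h, hh⟩)
      have hlt : 2*m < 2^k := by
        by_contra hcon
        have h1 : (1:Int) ≤ 2*m / 2^k := Int.le_ediv_iff_mul_le (by positivity) |>.mpr (by omega)
        omega
      have := cb_eq_25 m k h0 hk24 hlt
      simp only [resAt, this]

theorem beq_pbit (n : Int) (i : Nat) : (n / 2^i % 2 == 1) = pbit n i := by
  unfold pbit; by_cases h : n / 2^i % 2 = 1 <;> simp [h]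

theorem beq_decide (a b : Int) : (a == b) = decide (a = b) := by
  by_cases h : a = b <;> simp [h]

theorem pr5 : PySem.List.pyRange 0 5 1 = [0, 1, 2, 3, 4] := by decide

-- B's comprehension is exactly the finished grid: cell (r,c) is bit 24-5r-c
theorem alt_grid (n : Int) :
    (PySem.List.pyRange 0 5 1).map (fun r =>
      (PySem.List.pyRange 0 5 1).map (fun c =>
        PySem.Int.mod (PySem.Int.floordiv n ((2:Int) ^ (24 - 5*r - c).toNat)) 2 == 1))
      = resAt n 25 := by
  have hfd : ∀ (a : Int) (k : Nat), PySem.Int.floordiv a (2^k) = a / 2^k :=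
    fun a k => fd2 _ _ (by positivity)
  simp only [pr5, List.map, resAt, cb]
  norm_num [hfd, md2, beq_pbit]
  norm_num [pbit, beq_decide, show Int.toNat 2 = 2 from rfl, show Int.toNat 3 = 3 from rfl, show Int.toNat 4 = 4 from rfl, show Int.toNat 5 = 5 from rfl, show Int.toNat 6 = 6 from rfl, show Int.toNat 7 = 7 from rfl, show Int.toNat 8 = 8 from rfl, show Int.toNat 9 = 9 from rfl, show Int.toNat 10 = 10 from rfl, show Int.toNat 11 = 11 from rfl, show Int.toNat 12 = 12 from rfl, show Int.toNat 13 = 13 from rfl, show Int.toNat 14 = 14 from rfl, show Int.toNat 15 = 15 from rfl, show Int.toNat 16 = 16 from rfl, show Int.toNat 17 = 17 from rfl, show Int.toNat 18 = 18 from rfl, show Int.toNat 19 = 19 from rfl, show Int.toNat 20 = 20 from rfl, show Int.toNat 21 = 21 from rfl, show Int.toNat 22 = 22 from rfl, show Int.toNat 23 = 23 from rfl, show Int.toNat 24 = 24 from rfl]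

-- ===== VERDICT =====
theorem b2l_spec : Claim_equal_b2l := by
  intro number _ hpre
  unfold Spec_b2l b2l b2l_alt
  rw [if_neg (by simp [Pre_b2l] at hpre; omega), if_neg (by simp [Pre_b2l] at hpre; omega)]
  rw [alt_grid]
  have h0 : 0 ≤ number := hpre.1
  have := loopA 25 0 number h0 (by omega)
  simpa [resAt, cb, pow_zero, Int.mul_comm] using this
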